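-- pv_equiv track=rewrite | github.com/iskrov/kotori | backend/tests/utils/test_helpers.py | generate_phrases
-- ===== SOURCE A (Python) =====
-- from typing import Dict, Any, List, Optional, Union, Callable
--
-- def generate_phrases(count: int) -> List[str]:
--     """Generate test phrases."""
--     base_phrases = [
--         "The quick brown fox jumps over the lazy dog",
--         "Pack my box with five dozen liquor jugs",
--         "How vexingly quick daft zebras jump",
--         "Waltz, bad nymph, for quick jigs vex",
--         "Sphinx of black quartz, judge my vow"
--     ]
--
--     phrases = []
--     for i in range(count):
--         if i < len(base_phrases):
--             phrases.append(base_phrases[i])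
--         else:
--             phrases.append(f"Generated test phrase number {i}")
--
--     return phrases
-- ===== SOURCE B (Python) =====
-- from typing import List
--
-- def generate_phrases(count: int) -> List[str]:
--     """Generate test phrases."""
--     base_phrases = [
--         "The quick brown fox jumps over the lazy dog",
--         "Pack my box with five dozen liquor jugs",
--         "How vexingly quick daft zebras jump",
--         "Waltz, bad nymph, for quick jigs vex",
--         "Sphinx of black quartz, judge my vow"
--     ]
--     # Build the list back-to-front: generated tail first, then the base prefix
--     # in reverse, with no conditional inside either loop; reverse once at the end.
--     phrases = []
--     i = count - 1
--     while i >= len(base_phrases):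
--         phrases.append(f"Generated test phrase number {i}")
--         i -= 1
--     while i >= 0:
--         phrases.append(base_phrases[i])
--         i -= 1
--     phrases.reverse()
--     return phrases
-- ===== Notes on version B (the rewrite author's own statement) =====
-- stated objective: alternative
-- what changed: B builds the list back-to-front in two branch-free while loops (generated tail first, then the base prefix in reverse) and reverses once at the end, instead of A's single forward loop with a per-index conditional.
import Mathlib
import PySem

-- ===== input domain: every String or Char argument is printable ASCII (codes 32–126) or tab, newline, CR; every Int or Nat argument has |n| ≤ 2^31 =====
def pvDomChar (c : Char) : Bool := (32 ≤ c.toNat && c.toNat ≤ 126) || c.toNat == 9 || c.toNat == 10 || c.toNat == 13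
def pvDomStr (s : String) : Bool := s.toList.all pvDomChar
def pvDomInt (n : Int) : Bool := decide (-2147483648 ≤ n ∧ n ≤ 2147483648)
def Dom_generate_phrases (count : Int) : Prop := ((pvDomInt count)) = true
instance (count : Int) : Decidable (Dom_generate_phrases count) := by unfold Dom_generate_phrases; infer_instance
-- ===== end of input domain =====

-- B builds the list back-to-front in two branch-free while loops (generated tail
-- first, then the base prefix in reverse) and reverses once at the end, instead of
-- A's single forward loop with a per-index conditional (alternative; same cost).

-- ===== PORT A =====
def basePhrases : List String :=
  [ "The quick brown fox jumps over the lazy dog"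
  , "Pack my box with five dozen liquor jugs"
  , "How vexingly quick daft zebras jump"
  , "Waltz, bad nymph, for quick jigs vex"
  , "Sphinx of black quartz, judge my vow" ]

def generate_phrases (count : Int) : List String :=
  (PySem.List.pyRange 0 count 1).foldl
    (fun phrases i =>
      if i < (basePhrases.length : Int) then
        phrases ++ [PySem.List.pyGetD basePhrases i ""]
      else
        phrases ++ ["Generated test phrase number " ++ PySem.Int.toStr i])
    []

-- ===== PORT B =====
-- `while i >= len(base_phrases): phrases.append(f"Generated test phrase number {i}"); i -= 1`
def genLoop (i : Int) (acc : List String) : Int × List String :=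
  if (basePhrases.length : Int) ≤ i then
    genLoop (i - 1) (acc ++ ["Generated test phrase number " ++ PySem.Int.toStr i])
  else (i, acc)
termination_by (i + 1 - basePhrases.length).toNat
decreasing_by simp [basePhrases] at *; omega

-- `while i >= 0: phrases.append(base_phrases[i]); i -= 1`
def baseLoop (i : Int) (acc : List String) : List String :=
  if 0 ≤ i then baseLoop (i - 1) (acc ++ [PySem.List.pyGetD basePhrases i ""])
  else acc
termination_by (i + 1).toNat
decreasing_by omega

def generate_phrases_alt (count : Int) : List String :=
  let p := genLoop (count - 1) []
  (baseLoop p.1 p.2).reverse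

-- ===== PRECONDITION & SPEC =====
def Spec_generate_phrases (count : Int) (out : List String) : Prop := out = generate_phrases_alt count
instance (count : Int) (out : List String) : Decidable (Spec_generate_phrases count out) := by unfold Spec_generate_phrases; infer_instance

-- ===== CLAIM (what is proved, stated in full; the proofs are below) =====
def Claim_equal_generate_phrases : Prop := ∀ (count : Int), Dom_generate_phrases count → Spec_generate_phrases count (generate_phrases count)

-- ===== LEMMAS AND PROOFS =====

-- A on a natural count equals the fixed prefix followed by the generated tail.
theorem genA_nat (n : Nat) :
    generate_phrases (n : Int) =
      basePhrases.take n ++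
      (PySem.List.pyRange (basePhrases.length : Int) (n : Int) 1).map
        (fun i => "Generated test phrase number " ++ PySem.Int.toStr i) := by
  have hlen : (basePhrases.length : Int) = 5 := by norm_num [basePhrases]
  induction n with
  | zero =>
    unfold generate_phrases
    rw [PySem.List.pyRange_one_eq_nil (by omega), PySem.List.pyRange_one_eq_nil (by omega)]
    simp
  | succ n ih =>
    have hstep : PySem.List.pyRange 0 ((n : Int) + 1) 1
        = PySem.List.pyRange 0 (n : Int) 1 ++ [(n : Int)] := by
      simpa using PySem.List.pyRange_one_succ_right (a := 0) (b := (n : Int)) (by omega)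
    unfold generate_phrases
    push_cast
    rw [hstep, List.foldl_append]
    simp only [List.foldl_cons, List.foldl_nil]
    have hAn := ih
    unfold generate_phrases at hAn
    rw [hAn, hlen]
    by_cases hn : n < 5
    · rw [if_pos (by omega : (n:Int) < 5)]
      rw [PySem.List.pyRange_one_eq_nil (show (n : Int) ≤ 5 by omega),
          PySem.List.pyRange_one_eq_nil (show (n : Int) + 1 ≤ 5 by omega)]
      have hnlt : n < basePhrases.length := by omega
      have hg : PySem.List.pyGetD basePhrases ((n : Nat) : Int) "" = basePhrases[n]'hnlt := by
        rw [PySem.List.pyGetD_natCast]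
        exact List.getD_eq_getElem _ _ hnlt
      rw [hg, List.take_add_one, List.getElem?_eq_getElem hnlt]
      simp
    · rw [if_neg (by omega : ¬ (n:Int) < 5)]
      have htail : PySem.List.pyRange 5 ((n : Int) + 1) 1
          = PySem.List.pyRange 5 (n : Int) 1 ++ [(n : Int)] := by
        simpa using PySem.List.pyRange_one_succ_right (a := 5) (b := (n : Int)) (by omega)
      rw [htail]
      have htake : basePhrases.take (n + 1) = basePhrases.take n := by
        rw [List.take_of_length_le (by omega), List.take_of_length_le (by omega)]
      rw [htake]
      simp

-- A for any integer count.
theorem genA_eq (count : Int) :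
    generate_phrases count =
      basePhrases.take (max count 0).toNat ++
      (PySem.List.pyRange (basePhrases.length : Int) count 1).map
        (fun i => "Generated test phrase number " ++ PySem.Int.toStr i) := by
  by_cases h0 : 0 ≤ count
  · obtain ⟨n, rfl⟩ := Int.eq_ofNat_of_zero_le h0
    have hmax : (max ((n : Nat) : Int) 0).toNat = n := by omega
    rw [hmax]
    exact genA_nat n
  · have : (max count 0).toNat = 0 := by omega
    rw [this]
    unfold generate_phrases
    rw [PySem.List.pyRange_one_eq_nil (by omega),
        PySem.List.pyRange_one_eq_nil (by norm_num [basePhrases]; omega)]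
    simp

-- the first while loop: final i is min i 4, acc gains the generated tail reversed
theorem genLoop_eq (i : Int) (acc : List String) :
    genLoop i acc =
      (min i ((basePhrases.length : Int) - 1),
        acc ++ ((PySem.List.pyRange (basePhrases.length : Int) (i + 1) 1).map
          (fun j => "Generated test phrase number " ++ PySem.Int.toStr j)).reverse) := by
  have hlen : (basePhrases.length : Int) = 5 := by norm_num [basePhrases]
  rw [hlen]
  obtain ⟨k, hk⟩ : ∃ k : Nat, (i - 4).toNat = k := ⟨_, rfl⟩
  induction k generalizing i acc with
  | zero =>
    have hi : i ≤ 4 := by omega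
    rw [genLoop, hlen, if_neg (by omega), PySem.List.pyRange_one_eq_nil (by omega)]
    simp; omega
  | succ k ih =>
    have hi : 5 ≤ i := by omega
    rw [genLoop, hlen, if_pos (by omega), ih _ _ (by omega)]
    have hstep : PySem.List.pyRange 5 (i + 1) 1
        = PySem.List.pyRange 5 i 1 ++ [i] := by
      have := PySem.List.pyRange_one_succ_right (a := 5) (b := i) (by omega)
      simpa using this
    have harg : i - 1 + 1 = i := by ring
    rw [harg, hstep]
    simp only [Prod.mk.injEq]
    exact ⟨by omega, by simp⟩

-- the second while loop: appends the prefix reversed (for i below the list length)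
theorem baseLoop_eq (i : Int) (acc : List String)
    (hi : i < (basePhrases.length : Int)) :
    baseLoop i acc = acc ++ (basePhrases.take (i + 1).toNat).reverse := by
  have hlen : (basePhrases.length : Int) = 5 := by norm_num [basePhrases]
  obtain ⟨k, hk⟩ : ∃ k : Nat, (i + 1).toNat = k := ⟨_, rfl⟩
  induction k generalizing i acc with
  | zero =>
    rw [baseLoop, if_neg (by omega), hk]
    simp
  | succ k ih =>
    have h0 : 0 ≤ i := by omega
    rw [baseLoop, if_pos h0]
    by_cases hk0 : k = 0
    · have hi0 : i = 0 := by omega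
      subst hi0
      rw [baseLoop, if_neg (by omega)]
      simp [basePhrases, PySem.List.pyGetD]
    · rw [ih _ _ (by omega) (by omega)]
      have hnlt : i.toNat < basePhrases.length := by omega
      have hg : PySem.List.pyGetD basePhrases i "" = basePhrases[i.toNat]'hnlt := by
        have h2 : ((i.toNat : Nat) : Int) = i := by omega
        conv_lhs => rw [← h2]
        rw [PySem.List.pyGetD_natCast]
        exact List.getD_eq_getElem _ _ hnlt
      have ht : (i + 1).toNat = i.toNat + 1 := by omega
      have ht' : (i - 1 + 1).toNat = i.toNat := by omega
      rw [hg, ht, ht',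
        show basePhrases.take (i.toNat + 1)
            = basePhrases.take i.toNat ++ [basePhrases[i.toNat]'hnlt] from by
          rw [List.take_add_one, List.getElem?_eq_getElem hnlt]; rfl,
        List.reverse_append]
      simp

-- ===== VERDICT (by name: the statement is the Claim_ definition above) =====
theorem generate_phrases_spec : Claim_equal_generate_phrases := by
  intro count _
  unfold Spec_generate_phrases generate_phrases_alt
  rw [genA_eq, genLoop_eq]
  have hlen : (basePhrases.length : Int) = 5 := by norm_num [basePhrases]
  have harg : count - 1 + 1 = count := by ring
  simp only [harg, hlen]
  rw [baseLoop_eq _ _ (by omega)]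
  have htake : basePhrases.take (min (count - 1) (5 - 1) + 1).toNat
      = basePhrases.take (max count 0).toNat := by
    by_cases h : count ≤ 5
    · congr 1; omega
    · rw [List.take_of_length_le (by simp [basePhrases]; omega),
          List.take_of_length_le (by simp [basePhrases]; omega)]
  rw [htake]
  simp
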